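-- pv_equiv track=rewrite | github.com/cruellaDev/problem-solving | programmers/level0/python/120812-get-most-frequent-value.py | solution
-- ===== SOURCE A (Python) =====
-- def solution(array):
--     dic = {}
--     for a in array:
--         if a not in dic:
--             dic[a] = 1
--         else:
--             dic[a] += 1
--     max_cnt = max(dic.values())
--     answer = []
--     for nmbr, cnt in dic.items():
--         if cnt == max_cnt:
--             answer.append(nmbr)
--     return -1 if len(answer) > 1 else answer[0]
-- ===== SOURCE B (Python) =====
-- def solution(array):
--     if not array:
--         raise ValueError("empty array")
--     # single pass: maintain counts, the current best count, its (unique-so-far) holder, and a tie flag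
--     counts = {}
--     best = 0
--     mode = 0
--     tie = False
--     for a in array:
--         c = counts.get(a, 0) + 1
--         counts[a] = c
--         if c > best:
--             best, mode, tie = c, a, False
--         elif c == best:
--             tie = True
--     return -1 if tie else mode
-- ===== Notes on version B (the rewrite author's own statement) =====
-- stated objective: alternative
-- what changed: Replaces A's count-dict plus two post-passes (max of values, then collecting all argmax keys) by a single streaming pass that maintains the running best count, its holder and a tie flag, deciding the answer online.
import Mathlib
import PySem

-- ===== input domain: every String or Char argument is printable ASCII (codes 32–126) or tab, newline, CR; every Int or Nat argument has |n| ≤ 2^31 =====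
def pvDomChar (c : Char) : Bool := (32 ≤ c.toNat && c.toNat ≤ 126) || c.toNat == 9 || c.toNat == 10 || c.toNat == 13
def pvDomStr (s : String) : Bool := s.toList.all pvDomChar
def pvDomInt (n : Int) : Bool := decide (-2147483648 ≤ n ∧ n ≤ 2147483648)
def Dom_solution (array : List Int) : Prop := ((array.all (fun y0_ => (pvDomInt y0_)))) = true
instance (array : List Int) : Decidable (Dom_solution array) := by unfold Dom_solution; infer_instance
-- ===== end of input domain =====

-- B replaces A's count-then-two-scans with one streaming pass keeping (best count, holder, tie flag);
-- equivalence of the RETURN value on nonempty input (both raise ValueError on []).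

-- ===== PORT A =====
def solution (array : List Int) : Int :=
  -- dic = {}; for a in array: if a not in dic: dic[a] = 1 else: dic[a] += 1
  let dic := array.foldl
    (fun (d : PySem.Dict Int Int) a =>
      if d.contains a = false then d.insert a 1 else d.insert a (d.getD a 0 + 1))
    PySem.Dict.empty
  -- max_cnt = max(dic.values())  (ValueError on empty dict → none; excluded by Pre_)
  match PySem.List.max? dic.values (fun x => x) with
  | none => 0
  | some max_cnt =>
    -- answer = []; for nmbr, cnt in dic.items(): if cnt == max_cnt: answer.append(nmbr)
    let answer := dic.items.foldl
      (fun (ans : List Int) p => if p.2 = max_cnt then ans ++ [p.1] else ans) []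
    -- return -1 if len(answer) > 1 else answer[0]
    if 1 < answer.length then -1
    else match PySem.List.pyGet? answer 0 with
      | some x => x
      | none => 0  -- IndexError: unreachable, answer is nonempty when max_cnt exists

-- ===== PORT B =====
-- state: (counts, best, mode, tie); c = counts.get(a,0)+1 appears inline
def altStep (st : PySem.Dict Int Int × Int × Int × Bool) (a : Int) :
    PySem.Dict Int Int × Int × Int × Bool :=
  if st.2.1 < st.1.getD a 0 + 1 then
    (st.1.insert a (st.1.getD a 0 + 1), st.1.getD a 0 + 1, a, false)
  else if st.1.getD a 0 + 1 = st.2.1 then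
    (st.1.insert a (st.1.getD a 0 + 1), st.2.1, st.2.2.1, true)
  else
    (st.1.insert a (st.1.getD a 0 + 1), st.2.1, st.2.2.1, st.2.2.2)

def solution_alt (array : List Int) : Int :=
  if array = [] then 0  -- raise ValueError; excluded by Pre_
  else
    let st := array.foldl altStep (PySem.Dict.empty, 0, 0, false)
    if st.2.2.2 then -1 else st.2.2.1

-- ===== PRECONDITION & SPEC =====
-- A raises ValueError on the empty list (max() of an empty values view); B raises ValueError there too.
def Pre_solution (array : List Int) : Prop := array ≠ []
instance (array : List Int) : Decidable (Pre_solution array) := by unfold Pre_solution; infer_instance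
def pvWitness_solution : List Int := ([1])
def Spec_solution (array : List Int) (out : Int) : Prop := out = solution_alt array
instance (array : List Int) (out : Int) : Decidable (Spec_solution array out) := by unfold Spec_solution; infer_instance

-- ===== CLAIM (what is proved, stated in full; the proofs are below) =====
def Claim_equal_solution : Prop := ∀ (array : List Int), Dom_solution array → Pre_solution array → Spec_solution array (solution array)

-- ===== LEMMAS AND PROOFS =====

-- invariant of B's streaming fold over the processed prefix l
def BInv (l : List Int) (st : PySem.Dict Int Int × Int × Int × Bool) : Prop :=
  (∀ v, st.1.getD v 0 = (l.count v : Int))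
  ∧ (∀ v, (l.count v : Int) ≤ st.2.1)
  ∧ (l = [] → st.2.1 = 0)
  ∧ (l ≠ [] → 1 ≤ st.2.1 ∧ (l.count st.2.2.1 : Int) = st.2.1)
  ∧ (st.2.2.2 = true ↔ ∃ v, v ≠ st.2.2.1 ∧ (l.count v : Int) = st.2.1 ∧ 1 ≤ l.count v)

theorem inv_step (l : List Int) (st : PySem.Dict Int Int × Int × Int × Bool) (a : Int)
    (h : BInv l st) : BInv (l ++ [a]) (altStep st a) := by
  obtain ⟨hc, hmax, hz, hne, htie⟩ := h
  have hsame : (l ++ [a]).count a = l.count a + 1 := by simp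
  have hother : ∀ v : Int, v ≠ a → (l ++ [a]).count v = l.count v := by
    intro v hv
    simp [List.count_append, Ne.symm hv]
  have hca := hc a
  have hgetD : ∀ v, (st.1.insert a (st.1.getD a 0 + 1)).getD v 0 = ((l ++ [a]).count v : Int) := by
    intro v
    rw [PySem.Dict.getD_insert]
    by_cases hv : v = a
    · rw [if_pos hv, hv, hsame, hca]; push_cast; ring
    · rw [if_neg hv, hother v hv, hc v]
  rw [altStep]
  by_cases h1 : st.2.1 < st.1.getD a 0 + 1
  · -- strictly new maximum: best := c, mode := a, tie := false
    rw [if_pos h1]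
    refine ⟨hgetD, ?_, by simp, ?_, ?_⟩
    · intro v
      show ((l ++ [a]).count v : Int) ≤ st.1.getD a 0 + 1
      by_cases hv : v = a
      · rw [hv, hsame]; push_cast; omega
      · rw [hother v hv]; have := hmax v; omega
    · intro _
      have h0 : (0:Int) ≤ (l.count a : Int) := Int.natCast_nonneg _
      refine ⟨?_, ?_⟩
      · show (1:Int) ≤ st.1.getD a 0 + 1
        rw [hca]
        omega
      show ((l ++ [a]).count a : Int) = st.1.getD a 0 + 1
      rw [hsame]; push_cast; omega
    · show (false = true) ↔ ∃ v, v ≠ a ∧ ((l ++ [a]).count v : Int) = st.1.getD a 0 + 1 ∧ 1 ≤ (l ++ [a]).count v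
      simp only [Bool.false_eq_true, false_iff]
      rintro ⟨v, hv1, hv2, -⟩
      rw [hother v hv1] at hv2
      have := hmax v
      omega
  · by_cases h2 : st.1.getD a 0 + 1 = st.2.1
    · -- ties the current maximum: tie := true
      rw [if_neg h1, if_pos h2]
      have hlne : l ≠ [] := by
        rintro rfl
        have h0 : st.1.getD a 0 = 0 := by rw [hca]; simp
        have := hz rfl
        omega
      obtain ⟨hb1, hmode⟩ := hne hlne
      have hma : a ≠ st.2.2.1 := by
        intro he
        rw [he, hc st.2.2.1, hmode] at h2
        omega
      refine ⟨hgetD, ?_, by simp, ?_, ?_⟩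
      · intro v
        show ((l ++ [a]).count v : Int) ≤ st.2.1
        by_cases hv : v = a
        · rw [hv, hsame]; push_cast; omega
        · rw [hother v hv]; exact hmax v
      · intro _
        refine ⟨hb1, ?_⟩
        show ((l ++ [a]).count st.2.2.1 : Int) = st.2.1
        rw [hother _ (Ne.symm hma)]
        exact hmode
      · show (true = true) ↔ _
        simp only [true_iff]
        refine ⟨a, hma, ?_, ?_⟩
        · show ((l ++ [a]).count a : Int) = st.2.1
          rw [hsame]; push_cast; omega
        · rw [hsame]; omega
    · -- strictly below the current maximum: state unchanged
      rw [if_neg h1, if_neg h2]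
      have h3 : st.1.getD a 0 + 1 < st.2.1 := by omega
      have hlne : l ≠ [] := by
        rintro rfl
        have h0 : st.1.getD a 0 = 0 := by rw [hca]; simp
        have := hz rfl
        omega
      obtain ⟨hb1, hmode⟩ := hne hlne
      have hma : a ≠ st.2.2.1 := by
        intro he
        rw [he, hc st.2.2.1, hmode] at h3
        omega
      have hcalt : (l.count a : Int) < st.2.1 := by rw [hca] at h3; omega
      refine ⟨hgetD, ?_, by simp, ?_, ?_⟩
      · intro v
        show ((l ++ [a]).count v : Int) ≤ st.2.1
        by_cases hv : v = a
        · rw [hv, hsame]; push_cast; omega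
        · rw [hother v hv]; exact hmax v
      · intro _
        refine ⟨hb1, ?_⟩
        show ((l ++ [a]).count st.2.2.1 : Int) = st.2.1
        rw [hother _ (Ne.symm hma)]
        exact hmode
      · show st.2.2.2 = true ↔ ∃ v, v ≠ st.2.2.1 ∧ ((l ++ [a]).count v : Int) = st.2.1 ∧ 1 ≤ (l ++ [a]).count v
        rw [htie]
        constructor
        · rintro ⟨v, hv1, hv2, hv3⟩
          have hv : v ≠ a := by
            intro he
            rw [he] at hv2
            omega
          exact ⟨v, hv1, by rw [hother v hv]; exact hv2, by rw [hother v hv]; exact hv3⟩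
        · rintro ⟨v, hv1, hv2, hv3⟩
          have hv : v ≠ a := by
            intro he
            rw [he, hsame] at hv2
            push_cast at hv2
            omega
          rw [hother v hv] at hv2 hv3
          exact ⟨v, hv1, hv2, hv3⟩

theorem inv_fold (l : List Int) : BInv l (l.foldl altStep (PySem.Dict.empty, 0, 0, false)) := by
  induction l using List.reverseRecOn with
  | nil =>
    refine ⟨by simp [PySem.Dict.getD_empty], by simp, fun _ => rfl, by simp, ?_⟩
    simp
  | append_singleton l a ih =>
    rw [List.foldl_append, List.foldl_cons, List.foldl_nil]
    exact inv_step l _ a ih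

-- a nodup list whose members all equal m and which contains m is [m]
theorem nodup_all_eq_singleton {α : Type} {l : List α} {m : α}
    (hn : l.Nodup) (ha : ∀ x ∈ l, x = m) (hm : m ∈ l) : l = [m] := by
  cases l with
  | nil => cases hm
  | cons x t =>
    have hx : x = m := ha x (by simp)
    subst hx
    have ht : t = [] := by
      cases t with
      | nil => rfl
      | cons y s =>
        have : y = x := ha y (by simp)
        simp [this] at hn
    simp [ht]

theorem two_mem_one_lt_length {α : Type} {l : List α} {x y : α}
    (hx : x ∈ l) (hy : y ∈ l) (hxy : x ≠ y) : 1 < l.length := by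
  rcases l with _ | ⟨a, _ | ⟨b, t⟩⟩
  · cases hx
  · simp only [List.mem_singleton] at hx hy
    exact absurd (hx.trans hy.symm) hxy
  · simp only [List.length_cons]
    omega

theorem foldl_append_if_prop {α β : Type} (p : α → Prop) [DecidablePred p] (f : α → β)
    (l : List α) (acc : List β) :
    l.foldl (fun acc x => if p x then acc ++ [f x] else acc) acc
      = acc ++ (l.filter (fun x => decide (p x))).map f := by
  induction l generalizing acc with
  | nil => simp
  | cons x t ih =>
    simp only [List.foldl_cons, List.filter_cons]
    by_cases h : p x
    · simp [h, ih]
    · simp [h, ih]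

theorem map_fst_filter_snd {α : Type} (c : α → Int) (t : Int) (s : List α) :
    (List.filter (fun x => decide (x.2 = t)) (s.map (fun k => (k, c k)))).map (fun p => p.1)
      = s.filter (fun k => decide (c k = t)) := by
  induction s with
  | nil => simp
  | cons a s ih =>
    by_cases h : c a = t <;> simp [h, ih]

-- ===== VERDICT-PROOF =====
theorem solution_spec : Claim_equal_solution := by
  unfold Claim_equal_solution
  intro array _ hpre
  unfold Spec_solution Pre_solution at *
  obtain ⟨hc, hmax, -, hne, htie⟩ := inv_fold array
  set st := array.foldl altStep (PySem.Dict.empty, 0, 0, false) with hst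
  obtain ⟨hb1, hmode⟩ := hne hpre
  -- A's dict is counter array
  have hdic : array.foldl
      (fun (d : PySem.Dict Int Int) a =>
        if d.contains a = false then d.insert a 1 else d.insert a (d.getD a 0 + 1))
      PySem.Dict.empty = PySem.Dict.counter array := by
    rw [← PySem.Dict.foldl_insert_getD_add_one_eq_counter]
    apply PySem.List.foldl_congr_mem
    intro d x _
    by_cases hcon : d.contains x
    · simp [hcon]
    · have hfalse : d.contains x = false := by simpa using hcon
      have h0 : d.getD x 0 = 0 := by
        apply PySem.Dict.getD_of_not_contains
        exact hfalse
      rw [if_pos hfalse, h0, zero_add]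
  unfold solution
  dsimp only
  rw [hdic]
  -- values of the counter
  have hval : (PySem.Dict.counter array).values
      = (PySem.Set.ofList array).map (fun k => (array.count k : Int)) := by
    show ((PySem.Dict.counter array).items.map (·.2)) = _
    rw [PySem.Dict.items_counter]
    simp
  have hmodemem : st.2.2.1 ∈ PySem.Set.ofList array := by
    rw [PySem.Set.mem_ofList, ← List.count_pos_iff]
    omega
  have hbmem : st.2.1 ∈ (PySem.Dict.counter array).values := by
    rw [hval]
    exact List.mem_map.mpr ⟨st.2.2.1, hmodemem, hmode⟩
  -- max(dic.values()) = best
  obtain ⟨m, hm⟩ : ∃ m, PySem.List.max? (PySem.Dict.counter array).values (fun x => x) = some m := by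
    rcases h : PySem.List.max? (PySem.Dict.counter array).values (fun x => x) with _ | m
    · rw [PySem.List.max?_eq_none_iff] at h
      rw [h] at hbmem
      cases hbmem
    · exact ⟨m, rfl⟩
  have hmval : m = st.2.1 := by
    have h1 := PySem.List.max?_isMax hm st.2.1 hbmem
    have h2 : m ≤ st.2.1 := by
      have hmem := PySem.List.max?_mem hm
      rw [hval] at hmem
      obtain ⟨k, -, hk⟩ := List.mem_map.mp hmem
      rw [← hk]
      exact hmax k
    omega
  rw [hm]
  dsimp only
  rw [hmval]
  -- answer = keys of maximal count, in first-occurrence order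
  rw [PySem.Dict.items_counter]
  rw [foldl_append_if_prop (fun pr : Int × Int => pr.2 = st.2.1) (fun pr => pr.1)]
  simp only [List.nil_append, map_fst_filter_snd]
  have hKmem : ∀ k, k ∈ (PySem.Set.ofList array).filter
      (fun k => decide ((array.count k : Int) = st.2.1))
      ↔ k ∈ PySem.Set.ofList array ∧ (array.count k : Int) = st.2.1 := by
    intro k
    rw [List.mem_filter]
    simp
  by_cases ht : st.2.2.2
  · -- tie: at least two maximal keys; A returns -1, B returns -1
    obtain ⟨v, hv1, hv2, hv3⟩ := htie.mp ht
    have hvK : v ∈ (PySem.Set.ofList array).filter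
        (fun k => decide ((array.count k : Int) = st.2.1)) :=
      (hKmem v).mpr ⟨by rw [PySem.Set.mem_ofList, ← List.count_pos_iff]; omega, hv2⟩
    have hmK : st.2.2.1 ∈ (PySem.Set.ofList array).filter
        (fun k => decide ((array.count k : Int) = st.2.1)) :=
      (hKmem _).mpr ⟨hmodemem, hmode⟩
    rw [if_pos (two_mem_one_lt_length hvK hmK hv1)]
    unfold solution_alt
    rw [if_neg hpre]
    dsimp only
    rw [← hst, if_pos ht]
  · -- no tie: the maximal key is unique; A returns answer[0] = mode, B returns mode
    have hKeq : (PySem.Set.ofList array).filter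
        (fun k => decide ((array.count k : Int) = st.2.1)) = [st.2.2.1] := by
      apply nodup_all_eq_singleton (List.Nodup.filter _ (PySem.Set.nodup_ofList array))
      · intro k hk
        obtain ⟨hk1, hk2⟩ := (hKmem k).mp hk
        by_contra hne'
        rw [PySem.Set.mem_ofList, ← List.count_pos_iff] at hk1
        exact ht (htie.mpr ⟨k, hne', hk2, by omega⟩)
      · exact (hKmem _).mpr ⟨hmodemem, hmode⟩
    rw [hKeq]
    rw [if_neg (by simp)]
    unfold solution_alt
    rw [if_neg hpre]
    dsimp only
    rw [← hst, if_neg ht]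
    simp [PySem.List.pyGet?, PySem.List.pyIdx?]
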